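-- pv_equiv track=rewrite | github.com/PuffyShoggoth/Competitive | CCC/CCC '96 S4 - When in Rome.py | romadd
-- ===== SOURCE A (Python) =====
-- nu={'I':1, 'V':5, 'X':10, 'L':50, 'C':100, 'D': 500, 'M':1000}
--
-- def romadd(nums):
--    stock=0
--    plus=0
--    prev=''
--    count=0
--    for g in range(0, len(nums)):
--             if nums[g]=='+': stock, plus = plus, 0
--             elif nums[g]=='=': return stock+plus
--             if prev=='I' and (nums[g]=='V' or nums[g]=='X'): plus=plus-nu['I']*2
--             elif prev=='X' and (nums[g]=='L' or nums[g]=='C'): plus=plus-nu['X']*2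
--             elif prev=='C' and (nums[g]=='D' or nums[g]=='M'): plus=plus-nu['C']*2
--             if nums[g]!='+': plus=plus+nu[nums[g]]
--             prev=nums[g]
-- ===== SOURCE B (Python) =====
-- # Alternative decomposition: split the text before the first '=' into '+'-groups
-- # and value each group by a closed pairwise rule; A instead runs one stateful scan.
-- nu={'I':1, 'V':5, 'X':10, 'L':50, 'C':100, 'D': 500, 'M':1000}
--
-- _SUB = {('I', 'V'), ('I', 'X'), ('X', 'L'), ('X', 'C'), ('C', 'D'), ('C', 'M')}
--
-- def _val(g):
--     total = sum(nu[c] for c in g)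
--     for a, b in zip(g, g[1:]):
--         if (a, b) in _SUB:
--             total -= 2 * nu[a]
--     return total
--
-- def romadd(nums):
--     groups = nums.split('=')[0].split('+')
--     last = _val(groups[-1])
--     second = _val(groups[-2]) if len(groups) >= 2 else 0
--     return second + last
-- ===== Notes on version B (the rewrite author's own statement) =====
-- stated objective: alternative
-- what changed: B splits the text before the first '=' into '+'-separated groups and values each group with a closed pairwise subtractive-pair rule over adjacent characters, summing the last two groups, instead of A's single character-by-character scan with stock/plus/prev state and add-then-subtract-2*prev corrections.
-- outside the precondition, e.g. on romadd(''): A returns None, B returns 0; on romadd('II'): A returns None, B returns 2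
import Mathlib
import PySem

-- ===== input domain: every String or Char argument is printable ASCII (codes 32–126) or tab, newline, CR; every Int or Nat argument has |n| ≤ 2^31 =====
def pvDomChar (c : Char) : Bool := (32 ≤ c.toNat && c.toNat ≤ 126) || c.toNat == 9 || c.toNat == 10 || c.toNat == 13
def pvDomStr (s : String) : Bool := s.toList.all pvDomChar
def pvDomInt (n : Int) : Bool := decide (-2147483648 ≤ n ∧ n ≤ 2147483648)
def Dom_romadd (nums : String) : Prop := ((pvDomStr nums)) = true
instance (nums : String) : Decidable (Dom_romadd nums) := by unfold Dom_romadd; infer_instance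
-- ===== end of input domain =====

-- B groups the text before the first '=' by '+' and values each group with a closed
-- pairwise subtractive rule, instead of A's single stateful prev/flag scan; objective: alternative.

-- ===== PORT A =====
def nuA : PySem.Dict Char Int :=
  PySem.Dict.ofList [('I', 1), ('V', 5), ('X', 10), ('L', 50), ('C', 100), ('D', 500), ('M', 1000)]

-- nu[c]; a KeyError input is outside Pre_, there the port returns the default 0
def nuGetA (c : Char) : Int := (nuA.get? c).getD 0

-- the for-loop of A with its state (stock, plus, prev); falling off the loop is
-- Python's implicit 'return None' (excluded by Pre_), rendered as 0
def romaddLoop : List Char → Int → Int → Option Char → Int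
  | [], _stock, _plus, _prev => 0
  | c :: rest, stock, plus, prev =>
    let sp := if c = '+' then (plus, 0) else (stock, plus)
    if c = '=' then sp.1 + sp.2
    else
      let plus1 :=
        if prev = some 'I' ∧ (c = 'V' ∨ c = 'X') then sp.2 - nuGetA 'I' * 2
        else if prev = some 'X' ∧ (c = 'L' ∨ c = 'C') then sp.2 - nuGetA 'X' * 2
        else if prev = some 'C' ∧ (c = 'D' ∨ c = 'M') then sp.2 - nuGetA 'C' * 2
        else sp.2
      let plus2 := if c ≠ '+' then plus1 + nuGetA c else plus1
      romaddLoop rest sp.1 plus2 (some c)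

def romadd (nums : String) : Int := romaddLoop nums.toList 0 0 none

-- ===== PORT B =====
def nuB : PySem.Dict Char Int :=
  PySem.Dict.ofList [('I', 1), ('V', 5), ('X', 10), ('L', 50), ('C', 100), ('D', 500), ('M', 1000)]

def nuGetB (c : Char) : Int := (nuB.get? c).getD 0

def subPairsB : List (Char × Char) :=
  [('I', 'V'), ('I', 'X'), ('X', 'L'), ('X', 'C'), ('C', 'D'), ('C', 'M')]

-- _val: total = sum of nu[c], then subtract 2*nu[a] for each adjacent subtractive pair
def valB (g : List Char) : Int :=
  (g.zip g.tail).foldl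
    (fun total ab => if (ab.1, ab.2) ∈ subPairsB then total - 2 * nuGetB ab.1 else total)
    ((g.map nuGetB).sum)

def romadd_alt (nums : String) : Int :=
  let groups := ((nums.toList.splitOn '=').headI).splitOn '+'
  let last := valB (PySem.List.pyGetD groups (-1) [])
  let second := if 2 ≤ groups.length then valB (PySem.List.pyGetD groups (-2) []) else 0
  second + last

-- ===== PRECONDITION & SPEC =====
def romChars : List Char := ['I', 'V', 'X', 'L', 'C', 'D', 'M', '+']

-- A returns an int exactly when a '=' occurs and every char before the first '=' is a
-- Roman digit or '+'; otherwise A raises KeyError or falls through returning None (not an int).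
def Pre_romadd (nums : String) : Prop :=
  '=' ∈ nums.toList ∧ ((nums.toList.takeWhile (· ≠ '=')).all (· ∈ romChars)) = true

instance (nums : String) : Decidable (Pre_romadd nums) := by unfold Pre_romadd; infer_instance

def pvWitness_romadd : String := "XIV+II="

def Spec_romadd (nums : String) (out : Int) : Prop := out = romadd_alt nums
instance (nums : String) (out : Int) : Decidable (Spec_romadd nums out) := by unfold Spec_romadd; infer_instance

-- ===== CLAIM (what is proved, stated in full; the proofs are below) =====
def Claim_equal_romadd : Prop := ∀ (nums : String), Dom_romadd nums → Pre_romadd nums → Spec_romadd nums (romadd nums)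

-- ===== LEMMAS AND PROOFS =====

theorem nuGet_eq (c : Char) : nuGetA c = nuGetB c := rfl

-- closed form of valB's foldl
theorem foldl_if_sub (f : Char × Char → Int) (p : Char × Char → Bool) :
    ∀ (L : List (Char × Char)) (init : Int),
      L.foldl (fun t ab => if p ab then t - f ab else t) init
        = init - ((L.filter p).map f).sum
  | [], init => by simp
  | ab :: L, init => by
    simp only [List.foldl_cons, List.filter_cons]
    by_cases h : p ab
    · simp only [h, if_true, List.map_cons, List.sum_cons, foldl_if_sub f p L]
      ring
    · simp only [h, foldl_if_sub f p L, Bool.false_eq_true, if_neg (by simp : ¬False)]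

theorem valB_closed (g : List Char) :
    valB g = (g.map nuGetB).sum
      - (((g.zip g.tail).filter (fun ab => (ab.1, ab.2) ∈ subPairsB)).map
          (fun ab => 2 * nuGetB ab.1)).sum := by
  unfold valB
  rw [show (fun (total : Int) (ab : Char × Char) =>
        if (ab.1, ab.2) ∈ subPairsB then total - 2 * nuGetB ab.1 else total)
      = (fun total ab => if (fun ab : Char × Char => decide ((ab.1, ab.2) ∈ subPairsB)) ab
            then total - (fun ab : Char × Char => 2 * nuGetB ab.1) ab else total) from by
        funext t ab; simp]
  rw [foldl_if_sub]

theorem pairs_snoc : ∀ (g : List Char) (c : Char),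
    (g ++ [c]).zip ((g ++ [c]).tail)
      = g.zip g.tail ++ (match g.getLast? with | none => [] | some a => [(a, c)])
  | [], c => by simp
  | [a], c => by simp
  | a :: b :: t, c => by
    have ih := pairs_snoc (b :: t) c
    simp only [List.cons_append, List.tail_cons, List.zip_cons_cons] at *
    rw [ih]
    simp [List.getLast?_cons_cons]

theorem valB_snoc (g : List Char) (c : Char) :
    valB (g ++ [c]) = valB g + nuGetB c
      - (match g.getLast? with
         | none => 0
         | some a => if (a, c) ∈ subPairsB then 2 * nuGetB a else 0) := by
  rcases h : g.getLast? with _ | a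
  · rw [valB_closed, valB_closed, pairs_snoc, h]
    simp only [List.append_nil, List.map_append, List.sum_append, List.map_cons,
      List.sum_cons, List.map_nil, List.sum_nil]
    ring
  · rw [valB_closed, valB_closed, pairs_snoc, h]
    simp only [List.filter_append, List.map_append, List.sum_append, List.filter_cons,
      List.filter_nil, List.map_cons, List.sum_cons, List.map_nil, List.sum_nil]
    by_cases hp : (a, c) ∈ subPairsB
    · simp only [hp, decide_true, if_true, List.map_cons, List.sum_cons, List.map_nil,
        List.sum_nil]
      ring
    · simp [hp]
      ring

-- splitOn facts
theorem splitOn_no_sep : ∀ (g : List Char), '+' ∉ g → g.splitOn '+' = [g]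
  | [], _ => by simp [List.splitOn]
  | c :: g, h => by
    have hc : ¬ (c == '+') = true := by
      simp only [List.mem_cons, not_or] at h
      simp only [beq_iff_eq]
      exact fun hcc => h.1 hcc.symm
    have ih := splitOn_no_sep g (by intro hm; exact h (List.mem_cons_of_mem _ hm))
    simp only [List.splitOn] at *
    rw [List.splitOnP_cons, if_neg hc, ih]
    rfl

theorem splitOn_sep_mid : ∀ (g w : List Char), '+' ∉ g →
    (g ++ '+' :: w).splitOn '+' = g :: w.splitOn '+'
  | [], w, _ => by
    simp only [List.nil_append, List.splitOn]
    rw [List.splitOnP_cons]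
    simp
  | c :: g, w, h => by
    have hc : ¬ (c == '+') = true := by
      simp only [List.mem_cons, not_or] at h
      simp only [beq_iff_eq]
      exact fun hcc => h.1 hcc.symm
    have ih := splitOn_sep_mid g w (by intro hm; exact h (List.mem_cons_of_mem _ hm))
    simp only [List.splitOn] at *
    rw [List.cons_append, List.splitOnP_cons, if_neg hc, ih]
    rfl

theorem headI_splitOn : ∀ (l : List Char) (sep : Char),
    (l.splitOn sep).headI = l.takeWhile (· ≠ sep)
  | [], sep => by simp [List.splitOn]
  | c :: l, sep => by
    have ih := headI_splitOn l sep
    simp only [List.splitOn] at *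
    rw [List.splitOnP_cons]
    by_cases hc : c = sep
    · simp [hc]
    · have hne : ¬ (c == sep) = true := by simp [hc]
      rw [if_neg hne]
      obtain ⟨h0, t0, ht⟩ := List.exists_cons_of_ne_nil (List.splitOnP_ne_nil (· == sep) l)
      rw [ht]
      simp only [List.modifyHead, List.headI]
      rw [List.takeWhile_cons, if_pos (by simp [hc])]
      rw [ht] at ih
      simp only [List.headI] at ih
      rw [ih]

-- the invariant tying A's prev to the current group
def prevInv (g : List Char) (prev : Option Char) : Prop :=
  match g.getLast? with
  | none => prev = none ∨ prev = some '+'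
  | some a => prev = some a

-- B's answer computed from a group context g and remaining text w
def finish (stock : Int) (g w : List Char) : Int :=
  let G := (g ++ w).splitOn '+'
  (if 2 ≤ G.length then valB (PySem.List.pyGetD G (-2) []) else stock)
    + valB (PySem.List.pyGetD G (-1) [])

theorem valB_nil : valB [] = 0 := by simp [valB]

theorem pyGetD_cons_neg_two (a : List Char) (xs : List (List Char)) (h : 2 ≤ xs.length) :
    PySem.List.pyGetD (a :: xs) (-2) ([] : List Char) = PySem.List.pyGetD xs (-2) [] := by
  rw [PySem.List.pyGetD_neg_ofNat (a :: xs) 2 [] (by omega) (by simp; omega),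
    PySem.List.pyGetD_neg_ofNat xs 2 [] (by omega) (by omega)]
  have hlen : (a :: xs).length - 2 = (xs.length - 2) + 1 := by simp; omega
  simp only [hlen, List.getElem_cons_succ]

theorem finish_plus (stock : Int) (g w : List Char) (hg : '+' ∉ g) :
    finish stock g ('+' :: w) = finish (valB g) [] w := by
  unfold finish
  rw [splitOn_sep_mid g w hg]
  simp only [List.nil_append]
  obtain ⟨x, t, ht⟩ := List.exists_cons_of_ne_nil (List.splitOnP_ne_nil (· == '+') w)
  rw [show w.splitOn '+' = x :: t from ht]
  rcases t with _ | ⟨y, t'⟩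
  · have e1 : PySem.List.pyGetD [x] (-1) ([] : List Char) = x := by
      rw [PySem.List.pyGetD_neg_one [x] [] (by simp)]; simp
    have e2 : PySem.List.pyGetD [g, x] (-1) ([] : List Char) = x := by
      rw [PySem.List.pyGetD_neg_one [g, x] [] (by simp)]; simp
    have e3 : PySem.List.pyGetD [g, x] (-2) ([] : List Char) = g := by
      rw [PySem.List.pyGetD_neg_ofNat [g, x] 2 [] (by omega) (by simp)]
      simp
    rw [e1, e2, e3]
    simp
  · have h2 : 2 ≤ (x :: y :: t').length := by simp only [List.length_cons]; omega
    have hne : (x :: y :: t') ≠ [] := by simp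
    have e4 : PySem.List.pyGetD (g :: x :: y :: t') (-1) ([] : List Char)
        = (x :: y :: t').getLast hne := by
      rw [PySem.List.pyGetD_neg_one (g :: x :: y :: t') [] (by simp)]
      exact List.getLast_cons hne
    have e5 : PySem.List.pyGetD (x :: y :: t') (-1) ([] : List Char)
        = (x :: y :: t').getLast hne := by
      rw [PySem.List.pyGetD_neg_one (x :: y :: t') [] hne]
    rw [pyGetD_cons_neg_two g _ h2, e4, e5,
      if_pos (show 2 ≤ (g :: x :: y :: t').length by simp only [List.length_cons]; omega),
      if_pos (show 2 ≤ (x :: y :: t').length by simp only [List.length_cons]; omega)]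

theorem subPairsB_iff (a c : Char) :
    (a, c) ∈ subPairsB ↔
      (a = 'I' ∧ (c = 'V' ∨ c = 'X')) ∨ (a = 'X' ∧ (c = 'L' ∨ c = 'C')) ∨
        (a = 'C' ∧ (c = 'D' ∨ c = 'M')) := by
  simp [subPairsB, Prod.ext_iff]
  tauto

theorem valB_snoc_none (g : List Char) (c : Char) (h : g.getLast? = none) :
    valB (g ++ [c]) = valB g + nuGetB c := by
  rw [valB_snoc, h]; ring

theorem valB_snoc_some (g : List Char) (a c : Char) (h : g.getLast? = some a) :
    valB (g ++ [c]) = valB g + nuGetB c - (if (a, c) ∈ subPairsB then 2 * nuGetB a else 0) := by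
  rw [valB_snoc, h]

theorem loop_main : ∀ (w : List Char) (rest g : List Char) (stock : Int) (prev : Option Char),
    (∀ c ∈ w, c ∈ romChars) → ('+' ∉ g) → prevInv g prev →
    romaddLoop (w ++ '=' :: rest) stock (valB g) prev = finish stock g w
  | [], rest, g, stock, prev, _, hg, _ => by
    have hsplit : g.splitOn '+' = [g] := splitOn_no_sep g hg
    have h1 : PySem.List.pyGetD [g] (-1) ([] : List Char) = g := by
      rw [PySem.List.pyGetD_neg_one [g] [] (by simp)]; simp
    simp [romaddLoop, finish, hsplit, h1]
  | c :: w, rest, g, stock, prev, hw, hg, hprev => by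
    have hc : c ∈ romChars := hw c (List.mem_cons_self ..)
    have hw' : ∀ x ∈ w, x ∈ romChars := fun x hx => hw x (List.mem_cons_of_mem _ hx)
    by_cases hplus : c = '+'
    · subst hplus
      have hstep : romaddLoop (('+' :: w) ++ '=' :: rest) stock (valB g) prev
          = romaddLoop (w ++ '=' :: rest) (valB g) 0 (some '+') := by
        simp [romaddLoop]
      rw [hstep, show (0 : Int) = valB [] from valB_nil.symm,
        loop_main w rest [] (valB g) (some '+') hw' (by simp) (by simp [prevInv]),
        finish_plus stock g w hg]
    · have hceq : c ≠ '=' := by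
        intro h; subst h; simp [romChars] at hc
      have hstep : romaddLoop ((c :: w) ++ '=' :: rest) stock (valB g) prev
          = romaddLoop (w ++ '=' :: rest) stock
              ((if prev = some 'I' ∧ (c = 'V' ∨ c = 'X') then valB g - nuGetA 'I' * 2
                else if prev = some 'X' ∧ (c = 'L' ∨ c = 'C') then valB g - nuGetA 'X' * 2
                else if prev = some 'C' ∧ (c = 'D' ∨ c = 'M') then valB g - nuGetA 'C' * 2
                else valB g) + nuGetA c) (some c) := by
        simp [romaddLoop, hplus, hceq]
      have hval : (if prev = some 'I' ∧ (c = 'V' ∨ c = 'X') then valB g - nuGetA 'I' * 2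
            else if prev = some 'X' ∧ (c = 'L' ∨ c = 'C') then valB g - nuGetA 'X' * 2
            else if prev = some 'C' ∧ (c = 'D' ∨ c = 'M') then valB g - nuGetA 'C' * 2
            else valB g) + nuGetA c = valB (g ++ [c]) := by
        unfold prevInv at hprev
        rcases hl : g.getLast? with _ | a
        · rw [hl] at hprev
          rw [valB_snoc_none g c hl]
          have h1 : ¬ (prev = some 'I' ∧ (c = 'V' ∨ c = 'X')) := by
            rcases hprev with h | h <;> subst h <;> simp
          have h2 : ¬ (prev = some 'X' ∧ (c = 'L' ∨ c = 'C')) := by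
            rcases hprev with h | h <;> subst h <;> simp
          have h3 : ¬ (prev = some 'C' ∧ (c = 'D' ∨ c = 'M')) := by
            rcases hprev with h | h <;> subst h <;> simp
          rw [if_neg h1, if_neg h2, if_neg h3]
          simp only [nuGet_eq]
        · rw [hl] at hprev
          subst hprev
          rw [valB_snoc_some g a c hl]
          by_cases hm : (a, c) ∈ subPairsB
          · rw [if_pos hm]
            rcases (subPairsB_iff a c).1 hm with ⟨ha, hc2⟩ | ⟨ha, hc2⟩ | ⟨ha, hc2⟩
            · subst ha
              rw [if_pos ⟨rfl, hc2⟩]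
              simp only [nuGet_eq]; ring
            · subst ha
              rw [if_neg (by simp), if_pos ⟨rfl, hc2⟩]
              simp only [nuGet_eq]; ring
            · subst ha
              rw [if_neg (by simp), if_neg (by simp), if_pos ⟨rfl, hc2⟩]
              simp only [nuGet_eq]; ring
          · rw [if_neg hm]
            rw [if_neg (fun h => hm ((subPairsB_iff a c).2
                  (Or.inl ⟨Option.some.inj h.1, h.2⟩))),
              if_neg (fun h => hm ((subPairsB_iff a c).2
                  (Or.inr (Or.inl ⟨Option.some.inj h.1, h.2⟩)))),
              if_neg (fun h => hm ((subPairsB_iff a c).2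
                  (Or.inr (Or.inr ⟨Option.some.inj h.1, h.2⟩))))]
            simp only [nuGet_eq]; ring
      rw [hstep, hval,
        loop_main w rest (g ++ [c]) stock (some c) hw'
          (by simp [hg]; intro hcc; exact hplus hcc.symm)
          (by simp [prevInv]),
        show finish stock g (c :: w) = finish stock (g ++ [c]) w from by
          unfold finish
          rw [show g ++ c :: w = (g ++ [c]) ++ w from by simp]]

-- ===== VERDICT (by name: the statement is the Claim_ definition above) =====
theorem romadd_spec : Claim_equal_romadd := by
  unfold Claim_equal_romadd
  intro nums _ hpre
  unfold Spec_romadd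
  obtain ⟨hmem, hchars'⟩ := hpre
  have hchars : ∀ c ∈ nums.toList.takeWhile (· ≠ '='), c ∈ romChars := by
    simpa [List.all_eq_true] using hchars'
  have hdrop : nums.toList.dropWhile (· ≠ '=') ≠ [] := by
    simp only [ne_eq, List.dropWhile_eq_nil_iff, not_forall]
    exact ⟨'=', hmem, by simp⟩
  obtain ⟨d, rest, hd⟩ := List.exists_cons_of_ne_nil hdrop
  have hdeq : d = '=' := by
    have h := List.head_dropWhile_not (p := fun c => decide (c ≠ '=')) (l := nums.toList) hdrop
    simp only [hd, List.head_cons] at h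
    simpa using h
  have hsplitl : nums.toList = nums.toList.takeWhile (· ≠ '=') ++ '=' :: rest := by
    conv_lhs => rw [← List.takeWhile_append_dropWhile (p := fun c => decide (c ≠ '='))
      (l := nums.toList)]
    rw [hd, hdeq]
  have main := loop_main (nums.toList.takeWhile (· ≠ '=')) rest [] 0 none hchars
    (by simp) (by simp [prevInv])
  rw [valB_nil] at main
  unfold romadd romadd_alt
  rw [headI_splitOn]
  conv_lhs => rw [hsplitl]
  rw [main]
  unfold finish
  simp only [List.nil_append]
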